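-- pv_equiv track=rewrite | github.com/XWasNotDeclared/TTTN_DeBai | List/MayDoSucManh/gen_output.py | analyze_ki_values
-- ===== SOURCE A (Python) =====
-- def analyze_ki_values(ki_list):
--     result = []
--     exploded = False
--     for k in ki_list:
--         if exploded:
--             result.append('?')
--         elif k > 100000:
--             result.append('?')
--             exploded = True
--         elif k <= 10:
--             result.append('N')
--         elif k <= 1000:
--             result.append('S')
--         elif k <= 100000:
--             result.append('SS')
--     return result
-- ===== SOURCE B (Python) =====
-- def analyze_ki_values(ki_list):
--     idx = next((i for i, k in enumerate(ki_list) if k > 100000), len(ki_list))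
--     def classify(k):
--         return 'N' if k <= 10 else 'S' if k <= 1000 else 'SS'
--     return [classify(k) for k in ki_list[:idx]] + ['?'] * (len(ki_list) - idx)
-- ===== Notes on version B (the rewrite author's own statement) =====
-- stated objective: simpler
-- what changed: Replaces A's single stateful pass carrying an 'exploded' boolean with a find-the-explosion-index step followed by building a classified prefix plus a '?'-filled suffix.
import Mathlib
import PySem

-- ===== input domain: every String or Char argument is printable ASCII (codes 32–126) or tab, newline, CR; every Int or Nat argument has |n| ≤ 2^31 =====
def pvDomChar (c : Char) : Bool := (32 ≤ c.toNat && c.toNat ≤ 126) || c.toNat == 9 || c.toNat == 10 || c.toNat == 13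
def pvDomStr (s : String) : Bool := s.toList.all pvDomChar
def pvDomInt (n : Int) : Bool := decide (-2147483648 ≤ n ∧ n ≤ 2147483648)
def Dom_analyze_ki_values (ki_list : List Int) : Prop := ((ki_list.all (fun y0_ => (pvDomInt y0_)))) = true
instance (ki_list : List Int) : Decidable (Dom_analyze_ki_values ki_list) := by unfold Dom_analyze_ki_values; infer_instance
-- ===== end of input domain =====

-- B replaces A's single stateful pass (an 'exploded' boolean) with a find-split-index
-- then classified-prefix ++ '?'-suffix decomposition (objective: simpler).


-- ===== PORT A =====
-- literal transliteration of A's loop: state (result, exploded), appends in branch order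
def analyze_ki_values_loop (ki_list : List Int) (result : List String) (exploded : Bool) : List String :=
  match ki_list with
  | [] => result
  | k :: rest =>
    if exploded then analyze_ki_values_loop rest (result ++ ["?"]) exploded
    else if k > 100000 then analyze_ki_values_loop rest (result ++ ["?"]) true
    else if k ≤ 10 then analyze_ki_values_loop rest (result ++ ["N"]) exploded
    else if k ≤ 1000 then analyze_ki_values_loop rest (result ++ ["S"]) exploded
    else if k ≤ 100000 then analyze_ki_values_loop rest (result ++ ["SS"]) exploded
    else analyze_ki_values_loop rest result exploded

def analyze_ki_values (ki_list : List Int) : List String :=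
  analyze_ki_values_loop ki_list [] false

-- ===== PORT B =====
def pvClassify (k : Int) : String :=
  if k ≤ 10 then "N" else if k ≤ 1000 then "S" else "SS"

def analyze_ki_values_alt (ki_list : List Int) : List String :=
  let idx := ki_list.findIdx (fun k => decide (k > 100000))
  (ki_list.take idx).map pvClassify ++ List.replicate (ki_list.length - idx) "?"

-- ===== PRECONDITION & SPEC =====
def Spec_analyze_ki_values (ki_list : List Int) (out : List String) : Prop := out = analyze_ki_values_alt ki_list
instance (ki_list : List Int) (out : List String) : Decidable (Spec_analyze_ki_values ki_list out) := by unfold Spec_analyze_ki_values; infer_instance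

-- ===== CLAIM (what is proved, stated in full; the proofs are below) =====
def Claim_equal_analyze_ki_values : Prop := ∀ (ki_list : List Int), Dom_analyze_ki_values ki_list → Spec_analyze_ki_values ki_list (analyze_ki_values ki_list)

-- ===== LEMMAS AND PROOFS =====

theorem loop_acc2 (ki_list : List Int) (res1 res2 : List String) (b : Bool) :
    analyze_ki_values_loop ki_list (res1 ++ res2) b = res1 ++ analyze_ki_values_loop ki_list res2 b := by
  induction ki_list generalizing res2 b with
  | nil => simp [analyze_ki_values_loop]
  | cons k rest ih =>
    simp only [analyze_ki_values_loop]
    split_ifs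
    all_goals first
      | (rw [List.append_assoc]; exact ih _ _)
      | exact ih res2 b

theorem loop_acc (ki_list : List Int) (res : List String) (b : Bool) :
    analyze_ki_values_loop ki_list res b = res ++ analyze_ki_values_loop ki_list [] b := by
  simpa using loop_acc2 ki_list res [] b

theorem loop_exploded (ki_list : List Int) :
    analyze_ki_values_loop ki_list [] true = List.replicate ki_list.length "?" := by
  induction ki_list with
  | nil => rfl
  | cons k rest ih =>
    simp only [analyze_ki_values_loop, if_pos]
    rw [loop_acc, ih]
    simp [List.replicate_succ]

theorem loop_eq_alt (ki_list : List Int) :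
    analyze_ki_values_loop ki_list [] false = analyze_ki_values_alt ki_list := by
  induction ki_list with
  | nil => rfl
  | cons k rest ih =>
    by_cases h : k > 100000
    · simp only [analyze_ki_values_loop, if_neg (Bool.false_ne_true), if_pos h]
      rw [loop_acc, loop_exploded]
      simp [analyze_ki_values_alt, List.findIdx_cons, h, List.replicate_succ]
    · have hle : k ≤ 100000 := by omega
      have halt : analyze_ki_values_alt (k :: rest) =
          pvClassify k :: analyze_ki_values_alt rest := by
        simp [analyze_ki_values_alt, List.findIdx_cons, h, pvClassify]
      rw [halt, ← ih]
      simp only [analyze_ki_values_loop, if_neg (Bool.false_ne_true), if_neg (by omega : ¬ k > 100000)]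
      by_cases h10 : k ≤ 10
      · rw [if_pos h10, loop_acc]; simp [pvClassify, h10]
      · by_cases h1000 : k ≤ 1000
        · rw [if_neg h10, if_pos h1000, loop_acc]; simp [pvClassify, h10, h1000]
        · rw [if_neg h10, if_neg h1000, if_pos hle, loop_acc]
          simp [pvClassify, h10, h1000]

-- ===== VERDICT (by name: the statement is the Claim_ definition above) =====
theorem analyze_ki_values_spec : Claim_equal_analyze_ki_values := by
  intro l _
  unfold Spec_analyze_ki_values analyze_ki_values
  exact loop_eq_alt l
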